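-- pv_equiv track=rewrite | github.com/zast4/Algorithms | Yandex-Algorithm-Training-1.0/lections/lection-5_prefsums-two-ptrs/1-make-prefix-zeroes.py | makeprefixzeroes
-- ===== SOURCE A (Python) =====
-- def makeprefixzeroes(nums):
--     prefixzeroes = [0] * (len(nums) + 1)
--     for i in range(1, len(nums) + 1):
--         if nums[i - 1] == 0:
--             prefixzeroes[i] = prefixzeroes[i - 1] + 1
--         else:
--             prefixzeroes[i] = prefixzeroes[i - 1]
--     return prefixzeroes
-- ===== SOURCE B (Python) =====
-- def makeprefixzeroes(nums):
--     n = len(nums)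
--     cuts = [i + 1 for i, x in enumerate(nums) if x == 0] + [n + 1]
--     res = []
--     start = 0
--     for c, end in enumerate(cuts):
--         res += [c] * (end - start)
--         start = end
--     return res
-- ===== Notes on version B (the rewrite author's own statement) =====
-- stated objective: alternative
-- what changed: Instead of scanning elements while threading a prefix value, B first extracts the positions of the zero elements and then constructs the prefix array by run-length concatenation: the constant block with value c spans the indices between the c-th and (c+1)-th zero position, emitted with list-repeat.
import Mathlib
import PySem

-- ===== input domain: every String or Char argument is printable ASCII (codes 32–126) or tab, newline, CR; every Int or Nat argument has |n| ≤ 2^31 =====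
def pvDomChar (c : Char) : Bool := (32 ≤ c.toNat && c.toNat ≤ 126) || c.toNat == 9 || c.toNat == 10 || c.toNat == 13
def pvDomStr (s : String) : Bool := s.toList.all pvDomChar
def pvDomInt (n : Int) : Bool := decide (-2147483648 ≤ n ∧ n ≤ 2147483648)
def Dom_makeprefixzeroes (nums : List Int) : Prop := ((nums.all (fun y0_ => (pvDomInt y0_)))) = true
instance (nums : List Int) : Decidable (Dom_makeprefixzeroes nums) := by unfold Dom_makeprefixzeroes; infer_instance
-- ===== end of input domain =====

-- B replaces A's index-threaded scan by a different algorithm: it extracts the positions of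
-- the zero elements and builds the prefix array by run-length concatenation of constant blocks
-- between consecutive zero positions (alternative; same O(n)).

-- ===== PORT A =====
-- A: prefixzeroes = [0]*(n+1); for i in range(1, n+1): prefixzeroes[i] = prefixzeroes[i-1] (+1 if nums[i-1]==0)
-- all indices are provably in range, so the total forms pyGetD/pySetD are exact here
def makeprefixzeroes (nums : List Int) : List Int :=
  (PySem.List.pyRange 1 ((nums.length : Int) + 1) 1).foldl
    (fun pz i =>
      if PySem.List.pyGetD nums (i - 1) 0 = 0 then
        PySem.List.pySetD pz i (PySem.List.pyGetD pz (i - 1) 0 + 1)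
      else
        PySem.List.pySetD pz i (PySem.List.pyGetD pz (i - 1) 0))
    (List.replicate (nums.length + 1) 0)

-- ===== PORT B =====
-- B: cuts = [i+1 for i, x in enumerate(nums) if x == 0] + [n+1];
--    res = []; start = 0; for c, end in enumerate(cuts): res += [c]*(end-start); start = end
def makeprefixzeroes_alt (nums : List Int) : List Int :=
  let n : Int := nums.length
  let cuts : List Int :=
    (PySem.List.enumerate nums).filterMap
      (fun p => if p.2 = 0 then some (p.1 + 1) else none) ++ [n + 1]
  ((PySem.List.enumerate cuts).foldl
    (fun (st : List Int × Int) ce =>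
      (st.1 ++ PySem.List.pyRepeat [ce.1] (ce.2 - st.2), ce.2))
    ([], 0)).1

-- ===== PRECONDITION & SPEC =====
def Spec_makeprefixzeroes (nums : List Int) (out : List Int) : Prop := out = makeprefixzeroes_alt nums
instance (nums : List Int) (out : List Int) : Decidable (Spec_makeprefixzeroes nums out) := by unfold Spec_makeprefixzeroes; infer_instance

-- ===== CLAIM (what is proved, stated in full; the proofs are below) =====
def Claim_equal_makeprefixzeroes : Prop := ∀ (nums : List Int), Dom_makeprefixzeroes nums → Spec_makeprefixzeroes nums (makeprefixzeroes nums)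

-- ===== LEMMAS AND PROOFS =====

-- number of zeroes among the first k elements, as an Int
def pvZ (nums : List Int) (k : Nat) : Int := ((nums.take k).countP (fun x => x == 0) : Nat)

-- the intended prefix array of length k+1
def pvP (nums : List Int) (k : Nat) : List Int := (List.range (k + 1)).map (pvZ nums)

-- the zero-position cut list B computes (without the final sentinel)
def pvZp (nums : List Int) : List Int :=
  (PySem.List.enumerate nums).filterMap (fun p => if p.2 = 0 then some (p.1 + 1) else none)

-- the run-length segment list: value c on [s, e) for consecutive cut points
def pvSeg (c s : Int) : List Int → List Int
  | [] => []
  | e :: r => List.replicate (e - s).toNat c ++ pvSeg (c + 1) e r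

theorem pvP_zero (nums : List Int) : pvP nums 0 = [0] := by
  simp [pvP, pvZ]

theorem pvP_succ (nums : List Int) (k : Nat) :
    pvP nums (k + 1) = pvP nums k ++ [pvZ nums (k + 1)] := by
  simp [pvP, List.range_succ]

theorem pvZ_succ (nums : List Int) (p : Nat) (h : p < nums.length) :
    pvZ nums (p + 1) = pvZ nums p + (if nums[p] = 0 then 1 else 0) := by
  unfold pvZ
  rw [List.take_add_one, List.getElem?_eq_getElem h]
  simp only [Option.toList_some, List.countP_append, List.countP_cons, List.countP_nil]
  push_cast
  simp only [beq_iff_eq]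
  split_ifs with hz <;> simp

theorem pvP_length (nums : List Int) (k : Nat) : (pvP nums k).length = k + 1 := by
  simp [pvP]

theorem pvP_getD (nums : List Int) (k : Nat) : (pvP nums k).getD k 0 = pvZ nums k := by
  have hk : k < (pvP nums k).length := by rw [pvP_length]; omega
  rw [List.getD_eq_getElem _ _ hk]
  simp [pvP]

-- A-side loop invariant: after the steps 1..p, the array is pvP p followed by the untouched zeroes
theorem pvA_inv (nums : List Int) : ∀ (m p : Nat), p + m = nums.length →
    (PySem.List.pyRange ((p : Int) + 1) ((nums.length : Int) + 1) 1).foldl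
      (fun pz i =>
        if PySem.List.pyGetD nums (i - 1) 0 = 0 then
          PySem.List.pySetD pz i (PySem.List.pyGetD pz (i - 1) 0 + 1)
        else
          PySem.List.pySetD pz i (PySem.List.pyGetD pz (i - 1) 0))
      (pvP nums p ++ List.replicate m 0)
    = pvP nums nums.length := by
  intro m
  induction m with
  | zero =>
    intro p hp
    rw [PySem.List.pyRange_one_eq_nil (by omega)]
    have : p = nums.length := by omega
    simp [this]
  | succ m ih =>
    intro p hp
    have hplt : p < nums.length := by omega
    rw [PySem.List.pyRange_one_cons (by omega)]
    rw [List.foldl_cons]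
    have hidx : ((p : Int) + 1) - 1 = (p : Int) := by ring
    have hget : PySem.List.pyGetD nums ((p : Int) + 1 - 1) 0 = nums.getD p 0 := by
      rw [hidx]; simp [PySem.List.pyGetD_natCast]
    have hgetpz : PySem.List.pyGetD (pvP nums p ++ List.replicate (m + 1) 0) ((p : Int) + 1 - 1) 0
        = pvZ nums p := by
      rw [hidx]; rw [PySem.List.pyGetD_natCast]
      rw [List.getD_append _ _ _ _ (by rw [pvP_length]; omega)]
      exact pvP_getD nums p
    have hset : ∀ v : Int,
        PySem.List.pySetD (pvP nums p ++ List.replicate (m + 1) 0) ((p : Int) + 1) v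
        = (pvP nums p ++ [v]) ++ List.replicate m 0 := by
      intro v
      have : ((p : Int) + 1) = ((p + 1 : Nat) : Int) := by push_cast; ring
      rw [this, PySem.List.pySetD_natCast]
      rw [List.set_append_right _ _ (by simp [pvP_length])]
      simp [pvP_length, List.replicate_succ]
    have hgd : nums.getD p 0 = nums[p] := List.getD_eq_getElem _ _ hplt
    have hstep :
        (if PySem.List.pyGetD nums ((p : Int) + 1 - 1) 0 = 0 then
          PySem.List.pySetD (pvP nums p ++ List.replicate (m + 1) 0) ((p : Int) + 1)
            (PySem.List.pyGetD (pvP nums p ++ List.replicate (m + 1) 0) ((p : Int) + 1 - 1) 0 + 1)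
        else
          PySem.List.pySetD (pvP nums p ++ List.replicate (m + 1) 0) ((p : Int) + 1)
            (PySem.List.pyGetD (pvP nums p ++ List.replicate (m + 1) 0) ((p : Int) + 1 - 1) 0))
        = pvP nums (p + 1) ++ List.replicate m 0 := by
      rw [hget, hgetpz, hgd]
      rw [pvP_succ, pvZ_succ nums p hplt]
      split_ifs with hz
      · rw [hset]
        try simp [List.append_assoc]
      · rw [hset]
        try simp [List.append_assoc]
    rw [hstep]
    have : (p : Int) + 1 + 1 = ((p + 1 : Nat) : Int) + 1 := by push_cast; ring
    rw [this, ih (p + 1) (by omega)]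

theorem pvA_eq (nums : List Int) : makeprefixzeroes nums = pvP nums nums.length := by
  unfold makeprefixzeroes
  have h := pvA_inv nums nums.length 0 (by omega)
  simpa [pvP_zero, List.replicate_succ] using h

-- shifting every cut point and the start by 1 does not change the segments
theorem pvSeg_shift : ∀ (cs : List Int) (c s : Int),
    pvSeg c (s + 1) (cs.map (· + 1)) = pvSeg c s cs := by
  intro cs
  induction cs with
  | nil => intro c s; simp [pvSeg]
  | cons e r ih =>
    intro c s
    simp only [List.map_cons, pvSeg]
    have h1 : e + 1 - (s + 1) = e - s := by ring
    rw [h1, ih]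

-- raising the base value by 1 maps (+1) over the segments
theorem pvSeg_base : ∀ (cs : List Int) (c s : Int),
    pvSeg (c + 1) s cs = (pvSeg c s cs).map (· + 1) := by
  intro cs
  induction cs with
  | nil => intro c s; simp [pvSeg]
  | cons e r ih =>
    intro c s
    simp only [pvSeg, List.map_append, List.map_replicate]
    rw [ih]

-- peeling a shifted cut list with nonnegative head
theorem pvSeg_map_head (e : Int) (r : List Int) (he : 0 ≤ e) :
    pvSeg 0 0 ((e :: r).map (· + 1)) = 0 :: pvSeg 0 0 (e :: r) := by
  simp only [List.map_cons, pvSeg, zero_add]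
  have h1 : (e + 1 - 0).toNat = (e - 0).toNat + 1 := by omega
  rw [h1, List.replicate_succ]
  have h2 := pvSeg_shift r 1 e
  rw [h2]
  simp

-- index shift for enumerate
theorem pvEnum_shift : ∀ (xs : List Int) (s : Int),
    PySem.List.enumerate xs (s + 1) = (PySem.List.enumerate xs s).map (fun p => (p.1 + 1, p.2)) := by
  intro xs
  induction xs with
  | nil => intro s; simp [PySem.List.enumerate_nil]
  | cons x t ih =>
    intro s
    rw [PySem.List.enumerate_cons, PySem.List.enumerate_cons, List.map_cons]
    rw [ih (s + 1)]

-- the cut list decomposes on cons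
theorem pvZp_cons (x : Int) (t : List Int) :
    pvZp (x :: t) = (if x = 0 then [(1 : Int)] else []) ++ (pvZp t).map (· + 1) := by
  unfold pvZp
  rw [PySem.List.enumerate_cons]
  rw [List.filterMap_cons, pvEnum_shift t 0, List.filterMap_map]
  have hfun : ((fun p : Int × Int => if p.2 = 0 then some (p.1 + 1) else none) ∘
      (fun p : Int × Int => (p.1 + 1, p.2)))
      = fun p : Int × Int => ((if p.2 = 0 then some (p.1 + 1) else none).map (· + 1)) := by
    funext p
    simp only [Function.comp]
    split_ifs <;> simp [add_comm, add_left_comm]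
  rw [hfun, ← List.map_filterMap]
  by_cases hx : x = 0 <;> simp [hx]

-- every cut point is at least 1
theorem pvZp_pos (nums : List Int) : ∀ e ∈ pvZp nums, 1 ≤ e := by
  intro e he
  unfold pvZp at he
  obtain ⟨p, hp, hpe⟩ := List.mem_filterMap.mp he
  obtain ⟨k, hk, rfl⟩ := (PySem.List.mem_enumerate_iff _ _ _).mp hp
  by_cases h : nums[k] = 0
  · simp [h] at hpe
    omega
  · simp [h] at hpe

-- the segments over B's cut list are exactly the prefix-zero array
theorem pvSeg_main : ∀ (nums : List Int),
    pvSeg 0 0 (pvZp nums ++ [(nums.length : Int) + 1]) = pvP nums nums.length := by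
  intro nums
  induction nums with
  | nil =>
    simp [pvZp, PySem.List.enumerate_nil, pvSeg, pvP, pvZ]
  | cons x t ih =>
    rw [pvZp_cons]
    have hlen : ((x :: t).length : Int) + 1 = ((t.length : Int) + 1) + 1 := by
      simp [List.length_cons]
    rw [hlen]
    have hzc : ∀ i : Nat, pvZ (x :: t) (i + 1) = pvZ t i + (if x = 0 then 1 else 0) := by
      intro i
      unfold pvZ
      rw [List.take_succ_cons]
      simp only [List.countP_cons, beq_iff_eq]
      push_cast
      split_ifs <;> simp
    have hP : pvP (x :: t) (x :: t).length
        = 0 :: (pvP t t.length).map (· + (if x = 0 then 1 else 0)) := by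
      apply List.ext_getElem
      · simp [pvP]
      · intro i h1 h2
        rcases i with _ | j
        · simp [pvP, pvZ]
        · have hL : (pvP (x :: t) (x :: t).length)[j + 1] = pvZ (x :: t) (j + 1) := by
            simp [pvP]
          have hR : (0 :: (pvP t t.length).map (· + (if x = 0 then 1 else 0)))[j + 1]
              = pvZ t j + (if x = 0 then 1 else 0) := by
            simp [pvP]
          rw [hL, hR, hzc j]
    rw [hP]
    by_cases hx : x = 0
    · have hgoal : (if x = 0 then [(1 : Int)] else []) ++ (pvZp t).map (· + 1)
            ++ [((t.length : Int) + 1) + 1]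
          = 1 :: (pvZp t ++ [(t.length : Int) + 1]).map (· + 1) := by
        simp [hx]
      rw [hgoal]
      have hpeel : pvSeg 0 0 (1 :: (pvZp t ++ [(t.length : Int) + 1]).map (· + 1))
          = 0 :: (pvSeg 0 0 (pvZp t ++ [(t.length : Int) + 1])).map (· + 1) := by
        simp only [pvSeg, zero_add]
        have hs := pvSeg_shift (pvZp t ++ [(t.length : Int) + 1]) 1 0
        simp only [zero_add] at hs
        rw [hs]
        have hb := pvSeg_base (pvZp t ++ [(t.length : Int) + 1]) 0 0
        simp only [zero_add] at hb
        rw [hb]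
        have h1 : ((1 : Int) - 0).toNat = 1 := rfl
        rw [h1]
        simp
      rw [hpeel, ih]
      simp [hx]
    · have hgoal : (if x = 0 then [(1 : Int)] else []) ++ (pvZp t).map (· + 1)
            ++ [((t.length : Int) + 1) + 1]
          = (pvZp t ++ [(t.length : Int) + 1]).map (· + 1) := by
        simp [hx]
      rw [hgoal]
      rcases hcs : pvZp t ++ [(t.length : Int) + 1] with _ | ⟨e, r⟩
      · exact absurd hcs (by simp)
      · have hepos : 0 ≤ e := by
          rcases hzt : pvZp t with _ | ⟨e', r'⟩
          · rw [hzt] at hcs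
            simp at hcs
            omega
          · rw [hzt] at hcs
            simp at hcs
            have := pvZp_pos t e' (by rw [hzt]; simp)
            omega
        rw [pvSeg_map_head e r hepos, ← hcs, ih]
        simp [hx]

-- B's fold over enumerated cuts produces the segments
theorem pvFold_seg : ∀ (cuts : List Int) (c0 : Int) (acc : List Int) (s : Int),
    ((PySem.List.enumerate cuts c0).foldl
      (fun (st : List Int × Int) ce =>
        (st.1 ++ PySem.List.pyRepeat [ce.1] (ce.2 - st.2), ce.2))
      (acc, s)).1 = acc ++ pvSeg c0 s cuts := by
  intro cuts
  induction cuts with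
  | nil => intro c0 acc s; simp [PySem.List.enumerate_nil, pvSeg]
  | cons e r ih =>
    intro c0 acc s
    rw [PySem.List.enumerate_cons, List.foldl_cons]
    simp only
    rw [ih (c0 + 1) (acc ++ PySem.List.pyRepeat [c0] (e - s)) e]
    rw [PySem.List.pyRepeat_singleton]
    simp [pvSeg, List.append_assoc]

theorem pvB_eq (nums : List Int) : makeprefixzeroes_alt nums = pvP nums nums.length := by
  unfold makeprefixzeroes_alt
  simp only
  rw [pvFold_seg]
  rw [List.nil_append]
  exact pvSeg_main nums

-- ===== VERDICT (by name: the statement is the Claim_ definition above) =====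
theorem makeprefixzeroes_spec : Claim_equal_makeprefixzeroes := by
  intro nums _
  unfold Spec_makeprefixzeroes
  rw [pvA_eq, pvB_eq]
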